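-- pv_equiv track=rewrite | github.com/Pichardescu/yang-mills-s3-computations | yang_mills_s3/rg/polymer_enumeration.py | count_polymers_exact
-- ===== SOURCE A (Python) =====
-- from typing import Dict, List, Tuple, Optional, Set
--
-- def count_polymers_exact(
--     adjacency: Dict[int, Set[int]],
--     max_size: int,
-- ) -> Dict[int, int]:
--     """
--     Count connected subgraphs (polymers) of each size by exact enumeration.
--
--     Uses BFS growth with canonical ordering to avoid double-counting:
--     grow from each node, adding neighbors in sorted order, store
--     canonical frozensets.
--
--     WARNING: Memory usage grows rapidly with max_size. For the 600-cell
--     with D_face=4, sizes 1-6 are feasible. For D_vertex~20, only 1-3.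
--
--     NUMERICAL: Results for the 600-cell face-sharing graph.
--
--     Parameters
--     ----------
--     adjacency : dict {node: set of neighbors}
--     max_size : int
--         Maximum polymer size to enumerate.
--
--     Returns
--     -------
--     counts : dict {size: count}
--     """
--     n = len(adjacency)
--     counts = {1: n}
--
--     if max_size < 2:
--         return counts
--
--     # Level-by-level BFS growth
--     # current_level = set of canonical frozensets at current size
--     current_level: Set[frozenset] = {frozenset([b]) for b in range(n)}
--
--     for s in range(2, max_size + 1):
--         next_level: Set[frozenset] = set()
--         for poly_set in current_level:
--             # Boundary: neighbors not in polymer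
--             boundary: Set[int] = set()
--             for b in poly_set:
--                 for nb in adjacency[b]:
--                     if nb not in poly_set:
--                         boundary.add(nb)
--             # Grow by adding each boundary node
--             for nb in boundary:
--                 canonical = frozenset(poly_set | {nb})
--                 next_level.add(canonical)
--
--         counts[s] = len(next_level)
--         current_level = next_level
--
--     return counts
-- ===== SOURCE B (Python) =====
-- def count_polymers_exact(adjacency, max_size):
--     """ESU-style enumeration: for each seed b, depth-first growth restricted to
--     nodes > b with sibling-forbidden sets, so each connected subgraph is
--     generated exactly once and no per-level set of frozensets is kept."""
--     n = len(adjacency)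
--     counts = {1: n}
--     if max_size < 2:
--         return counts
--     tally = {}
--     for b in range(n):
--         stack = [({b}, set())]
--         while stack:
--             sub, forb = stack.pop()
--             s = len(sub)
--             tally[s] = tally.get(s, 0) + 1
--             if s == max_size:
--                 continue
--             ext = []
--             for u in sub:
--                 for v in adjacency[u]:
--                     if v > b and v not in sub and v not in forb and v not in ext:
--                         ext.append(v)
--             blocked = set(forb)
--             for w in ext:
--                 blocked.add(w)
--                 stack.append((sub | {w}, set(blocked)))
--     for s in range(2, max_size + 1):
--         counts[s] = tally.get(s, 0)
--     return counts
-- ===== Notes on version B (the rewrite author's own statement) =====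
-- stated objective: alternative
-- what changed: Replaced the level-by-level BFS that stores the set of all canonical frozensets of each size with a per-seed iterative DFS (ESU-style): extensions are restricted to nodes greater than the seed and to nodes not in a sibling-forbidden set, so every connected subgraph is generated exactly once and no per-level dedup storage of frozensets is kept.
-- outside the precondition, e.g. on count_polymers_exact({0: set(), 1: {0}}, 2): A returns {1: 2, 2: 1}, B returns {1: 2, 2: 0}; on count_polymers_exact({1: {0}, 0: set()}, 2): A returns {1: 2, 2: 1}, B returns {1: 2, 2: 0}
import Mathlib
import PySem

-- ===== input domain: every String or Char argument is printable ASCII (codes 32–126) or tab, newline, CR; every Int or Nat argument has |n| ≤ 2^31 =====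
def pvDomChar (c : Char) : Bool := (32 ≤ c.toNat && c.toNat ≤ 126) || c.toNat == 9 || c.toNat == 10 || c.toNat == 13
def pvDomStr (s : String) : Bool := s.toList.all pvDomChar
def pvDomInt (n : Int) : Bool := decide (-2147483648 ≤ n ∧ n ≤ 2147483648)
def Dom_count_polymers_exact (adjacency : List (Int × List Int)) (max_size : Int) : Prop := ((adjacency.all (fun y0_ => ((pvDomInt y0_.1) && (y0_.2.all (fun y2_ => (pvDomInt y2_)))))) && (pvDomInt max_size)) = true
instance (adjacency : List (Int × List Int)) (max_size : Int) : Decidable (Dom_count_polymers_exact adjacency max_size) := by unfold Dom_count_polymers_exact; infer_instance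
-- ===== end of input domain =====

-- B replaces A's level-by-level BFS over sets of frozensets by a per-seed DFS (explicit
-- stack) with forbidden sets, ESU-style, generating each connected subgraph exactly once
-- with no per-level storage; equivalence is about the return value (neither mutates input).

-- ===== PORT A =====
-- adjacency[u] lookup (dict access; under Pre_ every accessed key is present)
def pvNbr (d : PySem.Dict Int (List Int)) (u : Int) : List Int := d.getD u []

-- canonical representation of a frozenset of ints: strictly sorted list; inserting a new
-- element keeps it canonical, so list equality models frozenset equality exactly
def pvInsSorted (x : Int) : List Int → List Int
  | [] => [x]
  | y :: ys => if x ≤ y then x :: y :: ys else y :: pvInsSorted x ys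

-- boundary: {nb : nb ∈ adjacency[b] for some b in poly, nb ∉ poly}, built as a Python set
def pvBoundary (d : PySem.Dict Int (List Int)) (poly : List Int) : PySem.Set Int :=
  poly.foldl (fun bd b =>
    (pvNbr d b).foldl (fun bd nb => if nb ∈ poly then bd else PySem.Set.add bd nb) bd)
    PySem.Set.empty

-- one level of BFS growth: next_level = {canonical(poly ∪ {nb})}
def pvStepA (d : PySem.Dict Int (List Int)) (cur : PySem.Set (List Int)) : PySem.Set (List Int) :=
  cur.foldl (fun next poly =>
    (pvBoundary d poly).foldl (fun next nb => PySem.Set.add next (pvInsSorted nb poly)) next)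
    PySem.Set.empty

def count_polymers_exact (adjacency : List (Int × List Int)) (max_size : Int) : List (Int × Int) :=
  let d := PySem.Dict.mk adjacency
  let n := d.size
  let counts0 : List (Int × Int) := [(1, (n : Int))]
  if max_size < 2 then counts0
  else
    let init : PySem.Set (List Int) := PySem.Set.ofList ((List.range n).map (fun b => [(b : Int)]))
    ((PySem.List.pyRange 2 (max_size + 1) 1).foldl
      (fun (acc : List (Int × Int) × PySem.Set (List Int)) s =>
        let next := pvStepA d acc.2
        (acc.1 ++ [(s, (next.length : Int))], next)) (counts0, init)).1

-- ===== PORT B =====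
-- ext = nodes > b, adjacent to sub, not in sub/forb, deduplicated in discovery order
def pvExt (d : PySem.Dict Int (List Int)) (b : Int) (sub forb : List Int) : List Int :=
  sub.foldl (fun ext u =>
    (pvNbr d u).foldl (fun ext v =>
      if b < v ∧ v ∉ sub ∧ v ∉ forb ∧ v ∉ ext then ext ++ [v] else ext) ext) []

-- the sibling loop: each extension node is pushed with the forbidden set of all
-- previously taken siblings (blocked accumulates)
def pvChildren (sub : List Int) : List Int → List Int → List (List Int × List Int)
  | _, [] => []
  | blocked, w :: ws =>
    let blocked' := PySem.Set.add blocked w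
    (PySem.Set.add sub w, blocked') :: pvChildren sub blocked' ws

-- bound on the number of children of any node of the DFS tree (for termination only)
def pvK (d : PySem.Dict Int (List Int)) : Nat := (PySem.Set.ofList d.values.flatten).length

def pvMeasure (K ms : Nat) (stack : List (List Int × List Int)) : Nat :=
  (stack.map (fun e => (K + 1) ^ (ms - e.1.length))).sum

lemma pvNbr_sub_flatten (d : PySem.Dict Int (List Int)) (u : Int) :
    ∀ v ∈ pvNbr d u, v ∈ d.values.flatten := by
  intro v hv
  simp only [pvNbr, PySem.Dict.getD_eq_get?_getD] at hv
  rcases h : d.get? u with _ | lu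
  · simp [h] at hv
  · simp only [h, Option.getD_some] at hv
    have := PySem.Dict.mem_items_of_get?_eq_some d h
    refine List.mem_flatten.2 ⟨lu, ?_, hv⟩
    simpa [PySem.Dict.values] using ⟨u, this⟩

lemma pvExt_inner_aux (d : PySem.Dict Int (List Int)) (b : Int) (sub forb : List Int)
    (m : List Int) (acc : List Int)
    (hacc : acc.Nodup ∧ ∀ v ∈ acc, v ∈ d.values.flatten ∧ v ∉ sub)
    (hm : ∀ v ∈ m, v ∈ d.values.flatten) :
    (m.foldl (fun ext v =>
        if b < v ∧ v ∉ sub ∧ v ∉ forb ∧ v ∉ ext then ext ++ [v] else ext) acc).Nodup ∧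
    ∀ v ∈ (m.foldl (fun ext v =>
        if b < v ∧ v ∉ sub ∧ v ∉ forb ∧ v ∉ ext then ext ++ [v] else ext) acc),
      v ∈ d.values.flatten ∧ v ∉ sub := by
  induction m generalizing acc with
  | nil => exact hacc
  | cons z m ihm =>
    simp only [List.foldl_cons]
    refine ihm _ ?_ (fun x hx => hm x (List.mem_cons_of_mem _ hx))
    split_ifs with hc
    · refine ⟨List.Nodup.append hacc.1 (by simp) ?_, ?_⟩
      · intro x hx hx'; simp at hx'; subst hx'; exact hc.2.2.2 hx
      · intro x hx
        rcases List.mem_append.1 hx with hx | hx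
        · exact hacc.2 x hx
        · simp at hx; subst hx
          exact ⟨hm _ (by simp), hc.2.1⟩
    · exact hacc

lemma pvExt_aux (d : PySem.Dict Int (List Int)) (b : Int) (sub forb : List Int)
    (l : List Int) (acc : List Int) (hacc : acc.Nodup ∧ ∀ v ∈ acc, v ∈ d.values.flatten ∧ v ∉ sub) :
    (l.foldl (fun ext u =>
      (pvNbr d u).foldl (fun ext v =>
        if b < v ∧ v ∉ sub ∧ v ∉ forb ∧ v ∉ ext then ext ++ [v] else ext) ext) acc).Nodup ∧
    ∀ v ∈ (l.foldl (fun ext u =>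
      (pvNbr d u).foldl (fun ext v =>
        if b < v ∧ v ∉ sub ∧ v ∉ forb ∧ v ∉ ext then ext ++ [v] else ext) ext) acc),
      v ∈ d.values.flatten ∧ v ∉ sub := by
  induction l generalizing acc with
  | nil => exact hacc
  | cons u l ih =>
    exact ih _ (pvExt_inner_aux d b sub forb (pvNbr d u) acc hacc (pvNbr_sub_flatten d u))

lemma pvExt_nodup (d : PySem.Dict Int (List Int)) (b : Int) (sub forb : List Int) :
    (pvExt d b sub forb).Nodup :=
  (pvExt_aux d b sub forb sub [] (by simp)).1

lemma pvExt_props (d : PySem.Dict Int (List Int)) (b : Int) (sub forb : List Int) :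
    ∀ v ∈ pvExt d b sub forb, v ∈ d.values.flatten ∧ v ∉ sub :=
  (pvExt_aux d b sub forb sub [] (by simp)).2

lemma pvExt_length_le (d : PySem.Dict Int (List Int)) (b : Int) (sub forb : List Int) :
    (pvExt d b sub forb).length ≤ pvK d := by
  classical
  have hn := pvExt_nodup d b sub forb
  have hs : ∀ v ∈ pvExt d b sub forb, v ∈ PySem.Set.ofList d.values.flatten := by
    intro v hv
    exact (PySem.Set.mem_ofList _ _).2 (pvExt_props d b sub forb v hv).1
  have h1 : (pvExt d b sub forb).toFinset.card = (pvExt d b sub forb).length :=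
    List.toFinset_card_of_nodup hn
  have h2 : (pvExt d b sub forb).toFinset ⊆ (PySem.Set.ofList d.values.flatten).toFinset := by
    intro x hx; simp only [List.mem_toFinset] at hx ⊢; exact hs x hx
  have h3 := Finset.card_le_card h2
  have h4 := (PySem.Set.ofList d.values.flatten).toFinset_card_le
  unfold pvK
  omega

lemma pvChildren_measure (K ms : Nat) (sub : List Int) :
    ∀ (ws blocked : List Int), (∀ w ∈ ws, w ∉ sub) →
      ((pvChildren sub blocked ws).map (fun e => (K + 1) ^ (ms - e.1.length))).sum
        = ws.length * (K + 1) ^ (ms - (sub.length + 1)) := by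
  intro ws
  induction ws with
  | nil => intro blocked _; simp [pvChildren]
  | cons w ws ih =>
    intro blocked hws
    have hw : w ∉ sub := hws w (by simp)
    simp only [pvChildren, List.map_cons, List.sum_cons,
      ih _ (fun x hx => hws x (by simp [hx]))]
    have : (PySem.Set.add sub w).length = sub.length + 1 := by
      rw [PySem.Set.add_of_not_mem hw]; simp
    rw [this]
    simp only [List.length_cons]
    ring

def pvDrain (d : PySem.Dict Int (List Int)) (ms b : Int)
    (stack : List (List Int × List Int)) (tally : PySem.Dict Int Int) : PySem.Dict Int Int :=
  match stack with
  | [] => tally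
  | (sub, forb) :: rest =>
    let s : Int := (sub.length : Int)
    let tally' := tally.insert s (tally.getD s 0 + 1)
    if ms ≤ s then pvDrain d ms b rest tally'
    else
      let ext := pvExt d b sub forb
      pvDrain d ms b (pvChildren sub forb ext ++ rest) tally'
termination_by pvMeasure (pvK d) ms.toNat stack
decreasing_by
  · simp only [pvMeasure, List.map_cons, List.sum_cons]
    have : 0 < (pvK d + 1) ^ (ms.toNat - sub.length) := pow_pos (by omega) _
    omega
  · simp only [pvMeasure, List.map_append, List.sum_append, List.map_cons, List.sum_cons]
    have hlt : sub.length < ms.toNat := by omega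
    have hc := pvChildren_measure (pvK d) ms.toNat sub (pvExt d b sub forb) forb
      (fun w hw => (pvExt_props d b sub forb w hw).2)
    rw [hc]
    have hK := pvExt_length_le d b sub forb
    have h1 : ms.toNat - sub.length = (ms.toNat - (sub.length + 1)) + 1 := by omega
    have h2 : (pvExt d b sub forb).length * (pvK d + 1) ^ (ms.toNat - (sub.length + 1))
        < (pvK d + 1) ^ (ms.toNat - sub.length) := by
      rw [h1, pow_succ]
      have hp : 0 < (pvK d + 1) ^ (ms.toNat - (sub.length + 1)) := pow_pos (by omega) _
      calc (pvExt d b sub forb).length * (pvK d + 1) ^ (ms.toNat - (sub.length + 1))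
          ≤ pvK d * (pvK d + 1) ^ (ms.toNat - (sub.length + 1)) :=
            Nat.mul_le_mul_right _ hK
        _ < (pvK d + 1) * (pvK d + 1) ^ (ms.toNat - (sub.length + 1)) :=
            (Nat.mul_lt_mul_right hp).2 (by omega)
        _ = (pvK d + 1) ^ (ms.toNat - (sub.length + 1)) * (pvK d + 1) := mul_comm _ _
    omega

def count_polymers_exact_alt (adjacency : List (Int × List Int)) (max_size : Int) : List (Int × Int) :=
  let d := PySem.Dict.mk adjacency
  let n := d.size
  let counts0 : List (Int × Int) := [(1, (n : Int))]
  if max_size < 2 then counts0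
  else
    let tally := (List.range n).foldl
      (fun tally b => pvDrain d max_size (b : Int) [([(b : Int)], PySem.Set.empty)] tally)
      PySem.Dict.empty
    counts0 ++ (PySem.List.pyRange 2 (max_size + 1) 1).map (fun s => (s, tally.getD s 0))

-- ===== PRECONDITION & SPEC =====
-- Pre_ excludes (for max_size ≥ 2) dicts that are not a well-formed undirected graph on
-- nodes 0..n-1: missing keys in 0..n-1 or out-of-range neighbours make A raise KeyError,
-- and on asymmetric (directed) neighbour sets A's directed-growth counts are an accident
-- of its one-sided boundary scan, which B (a per-seed undirected enumerator) does not match.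
def Pre_count_polymers_exact (adjacency : List (Int × List Int)) (max_size : Int) : Prop :=
  max_size < 2 ∨
  ((adjacency.map Prod.fst).Nodup ∧
   (∀ i ∈ List.range adjacency.length, ((i : Nat) : Int) ∈ adjacency.map Prod.fst) ∧
   (∀ p ∈ adjacency, ∀ v ∈ p.2,
      (∃ j ∈ List.range adjacency.length, v = ((j : Nat) : Int)) ∧
      p.1 ∈ pvNbr (PySem.Dict.mk adjacency) v))
instance (adjacency : List (Int × List Int)) (max_size : Int) : Decidable (Pre_count_polymers_exact adjacency max_size) := by unfold Pre_count_polymers_exact; infer_instance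

def pvWitness_count_polymers_exact : (List (Int × List Int)) × Int :=
  ([(0, [1, 2]), (1, [0]), (2, [0])], 3)

def Spec_count_polymers_exact (adjacency : List (Int × List Int)) (max_size : Int) (out : List (Int × Int)) : Prop := out = count_polymers_exact_alt adjacency max_size
instance (adjacency : List (Int × List Int)) (max_size : Int) (out : List (Int × Int)) : Decidable (Spec_count_polymers_exact adjacency max_size out) := by unfold Spec_count_polymers_exact; infer_instance

-- ===== CLAIM (what is proved, stated in full; the proofs are below) =====
def Claim_equal_count_polymers_exact : Prop := ∀ (adjacency : List (Int × List Int)) (max_size : Int), Dom_count_polymers_exact adjacency max_size → Pre_count_polymers_exact adjacency max_size → Spec_count_polymers_exact adjacency max_size (count_polymers_exact adjacency max_size)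

-- ===== LEMMAS AND PROOFS =====

-- the vertex set {0, …, n-1}
def pvV (n : Nat) : Finset Int := (Finset.range n).image (fun i : Nat => (i : Int))

-- connected subgraphs = sets grown from a singleton by repeatedly adding a neighbour
inductive PvGrown (nbr : Int → List Int) : Finset Int → Prop
  | single (x : Int) : PvGrown nbr {x}
  | step {S : Finset Int} {w u : Int} (hw : w ∉ S) (hu : u ∈ S) (ha : w ∈ nbr u)
      (hS : PvGrown nbr S) : PvGrown nbr (insert w S)

-- all connected subgraphs of (cast) size t
noncomputable def pvPSpec (nbr : Int → List Int) (n : Nat) (t : Int) : Finset (Finset Int) :=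
  @Finset.filter _ (fun S => PvGrown nbr S ∧ (S.card : Int) = t)
    (fun _ => Classical.propDecidable _) (pvV n).powerset

-- subgraphs counted by a DFS stack entry (sub, forb)
noncomputable def pvESpec (nbr : Int → List Int) (n : Nat) (ms b : Int)
    (sub forb : Finset Int) (t : Int) : Finset (Finset Int) :=
  @Finset.filter _
    (fun S => sub ⊆ S ∧ PvGrown nbr S ∧ (S.card : Int) = t ∧ (S.card : Int) ≤ ms ∧
      ∀ v ∈ S, v ∉ sub → (b < v ∧ v ∉ forb))
    (fun _ => Classical.propDecidable _) (pvV n).powerset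


-- subgraphs counted by the inner sibling loop: like pvESpec but excluding sub itself,
-- with the accumulated blocked set in place of forb
noncomputable def pvNSpec (nbr : Int → List Int) (n : Nat) (ms b : Int)
    (sub blocked : Finset Int) (t : Int) : Finset (Finset Int) :=
  @Finset.filter _
    (fun S => sub ⊆ S ∧ S ≠ sub ∧ PvGrown nbr S ∧ (S.card : Int) = t ∧ (S.card : Int) ≤ ms ∧
      ∀ v ∈ S, v ∉ sub → (b < v ∧ v ∉ blocked))
    (fun _ => Classical.propDecidable _) (pvV n).powerset

-- every proper connected extension of sub meets sub's neighbourhood (needs symmetry)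
lemma pvConnector {nbr : Int → List Int} (hsym : ∀ u v, v ∈ nbr u → u ∈ nbr v)
    {S : Finset Int} (hG : PvGrown nbr S) :
    ∀ {sub : Finset Int}, sub ⊆ S → sub.Nonempty → sub ≠ S →
      ∃ w ∈ S, w ∉ sub ∧ ∃ u ∈ sub, w ∈ nbr u := by
  induction hG with
  | single x =>
    intro sub hs hne hneq
    exact absurd ((Finset.Nonempty.subset_singleton_iff hne).1 hs) hneq
  | @step S0 w u hw hu ha hS ih =>
    intro sub hs hne hneq
    by_cases hwsub : w ∈ sub
    · by_cases h0 : sub.erase w = S0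
      · exfalso
        apply hneq
        have : insert w (sub.erase w) = insert w S0 := by rw [h0]
        rwa [Finset.insert_erase hwsub] at this
      · have hsub0 : sub.erase w ⊆ S0 := by
          intro x hx
          have hx1 := Finset.mem_of_mem_erase hx
          have hx2 := Finset.ne_of_mem_erase hx
          rcases Finset.mem_insert.1 (hs hx1) with h | h
          · exact absurd h hx2
          · exact h
        by_cases hne0 : (sub.erase w).Nonempty
        · obtain ⟨x, hxS0, hxns, u', hu', hadj⟩ := ih hsub0 hne0 h0
          by_cases hxsub : x ∈ sub
          · exfalso
            have : x = w := by
              by_contra hne'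
              exact hxns (Finset.mem_erase.2 ⟨hne', hxsub⟩)
            subst this; exact hw hxS0
          · exact ⟨x, Finset.mem_insert_of_mem hxS0, hxsub, u',
              Finset.mem_of_mem_erase hu', hadj⟩
        · have hsubw : sub = {w} := by
            rw [Finset.not_nonempty_iff_eq_empty] at hne0
            apply Finset.eq_singleton_iff_unique_mem.2
            refine ⟨hwsub, fun x hx => ?_⟩
            by_contra hne'
            exact absurd (Finset.mem_erase.2 ⟨hne', hx⟩) (by simp [hne0])
          refine ⟨u, Finset.mem_insert_of_mem hu, ?_, w, by simp [hsubw], hsym u w ha⟩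
          rw [hsubw]
          simp only [Finset.mem_singleton]
          intro hcon; subst hcon; exact hw hu
    · have hs0 : sub ⊆ S0 := by
        intro x hx
        rcases Finset.mem_insert.1 (hs hx) with h | h
        · subst h; exact absurd hx hwsub
        · exact h
      by_cases h0 : sub = S0
      · subst h0
        exact ⟨w, Finset.mem_insert_self _ _, hwsub, u, hu, ha⟩
      · obtain ⟨x, hx, hxn, u', hu', ha'⟩ := ih hs0 hne h0
        exact ⟨x, Finset.mem_insert_of_mem hx, hxn, u', hu', ha'⟩

-- canonical (strictly sorted) representations
lemma pvInsSorted_toFinset (x : Int) (l : List Int) :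
    (pvInsSorted x l).toFinset = insert x l.toFinset := by
  induction l with
  | nil => simp [pvInsSorted]
  | cons y ys ih =>
    simp only [pvInsSorted]
    split_ifs with h
    · simp
    · simp only [List.toFinset_cons, ih]
      ext a; simp; tauto

lemma pvInsSorted_sorted {x : Int} {l : List Int} (hl : l.Pairwise (· < ·)) (hx : x ∉ l) :
    (pvInsSorted x l).Pairwise (· < ·) := by
  induction l with
  | nil => simp [pvInsSorted]
  | cons y ys ih =>
    simp only [pvInsSorted]
    rcases List.pairwise_cons.1 hl with ⟨hy, hys⟩
    split_ifs with h
    · refine List.pairwise_cons.2 ⟨?_, hl⟩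
      intro b hb
      have hxy : x ≠ y := by intro hco; subst hco; exact hx (by simp)
      rcases List.mem_cons.1 hb with hb | hb
      · subst hb; omega
      · have := hy b hb; omega
    · refine List.pairwise_cons.2 ⟨?_, ih hys (fun hc => hx (by simp [hc]))⟩
      intro b hb
      have hbm : b = x ∨ b ∈ ys := by
        have := pvInsSorted_toFinset x ys
        have hb' : b ∈ (pvInsSorted x ys).toFinset := by simpa using hb
        rw [this] at hb'
        simpa using hb'
      rcases hbm with hb' | hb'
      · subst hb'; omega
      · exact hy b hb'

lemma pvSorted_nodup {l : List Int} (h : l.Pairwise (· < ·)) : l.Nodup :=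
  h.imp (fun h => ne_of_lt h)

lemma pvSorted_inj {l1 l2 : List Int} (h1 : l1.Pairwise (· < ·)) (h2 : l2.Pairwise (· < ·))
    (h : l1.toFinset = l2.toFinset) : l1 = l2 := by
  refine List.Perm.eq_of_pairwise (fun a b _ _ hab hba => absurd (lt_trans hab hba) (lt_irrefl a)) h1 h2 ?_
  refine (List.perm_ext_iff_of_nodup (pvSorted_nodup h1) (pvSorted_nodup h2)).2 ?_
  intro a
  constructor
  · intro ha; have : a ∈ l1.toFinset := by simpa using ha
    rw [h] at this; simpa using this
  · intro ha; have : a ∈ l2.toFinset := by simpa using ha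
    rw [← h] at this; simpa using this

-- boundary characterisation
lemma pvBoundary_inner_mem (poly : List Int) (m acc : List Int) (x : Int) :
    x ∈ m.foldl (fun bd nb => if nb ∈ poly then bd else PySem.Set.add bd nb) acc ↔
      x ∈ acc ∨ (x ∈ m ∧ x ∉ poly) := by
  induction m generalizing acc with
  | nil => simp
  | cons v vs ih =>
    simp only [List.foldl_cons, ih]
    split_ifs with h
    · constructor
      · rintro (hx | hx); · exact Or.inl hx
        · exact Or.inr ⟨by simp [hx.1], hx.2⟩
      · rintro (hx | ⟨hx1, hx2⟩); · exact Or.inl hx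
        · rcases List.mem_cons.1 hx1 with h' | h'
          · subst h'; exact absurd h hx2
          · exact Or.inr ⟨h', hx2⟩
    · rw [PySem.Set.mem_add]
      constructor
      · rintro ((hx | hx) | hx)
        · exact Or.inl hx
        · subst hx; exact Or.inr ⟨by simp, h⟩
        · exact Or.inr ⟨by simp [hx.1], hx.2⟩
      · rintro (hx | ⟨hx1, hx2⟩)
        · exact Or.inl (Or.inl hx)
        · rcases List.mem_cons.1 hx1 with h' | h'
          · subst h'; exact Or.inl (Or.inr rfl)
          · exact Or.inr ⟨h', hx2⟩

lemma pvBoundary_outer_mem (d : PySem.Dict Int (List Int)) (poly : List Int)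
    (l acc : List Int) (x : Int) :
    x ∈ l.foldl (fun bd b =>
        (pvNbr d b).foldl (fun bd nb => if nb ∈ poly then bd else PySem.Set.add bd nb) bd) acc ↔
      x ∈ acc ∨ ((∃ u ∈ l, x ∈ pvNbr d u) ∧ x ∉ poly) := by
  induction l generalizing acc with
  | nil => simp
  | cons u us ih =>
    simp only [List.foldl_cons, ih, pvBoundary_inner_mem]
    constructor
    · rintro ((hx | hx) | hx)
      · exact Or.inl hx
      · exact Or.inr ⟨⟨u, by simp, hx.1⟩, hx.2⟩
      · obtain ⟨⟨u', hu', hx1⟩, hx2⟩ := hx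
        exact Or.inr ⟨⟨u', by simp [hu'], hx1⟩, hx2⟩
    · rintro (hx | ⟨⟨u', hu', hx1⟩, hx2⟩)
      · exact Or.inl (Or.inl hx)
      · rcases List.mem_cons.1 hu' with h' | h'
        · subst h'; exact Or.inl (Or.inr ⟨hx1, hx2⟩)
        · exact Or.inr ⟨⟨u', h', hx1⟩, hx2⟩

lemma pvMem_boundary (d : PySem.Dict Int (List Int)) (poly : List Int) (x : Int) :
    x ∈ pvBoundary d poly ↔ (∃ u ∈ poly, x ∈ pvNbr d u) ∧ x ∉ poly := by
  unfold pvBoundary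
  rw [pvBoundary_outer_mem]
  simp [PySem.Set.empty]

-- stepA characterisation
lemma pvStepA_outer_mem (d : PySem.Dict Int (List Int)) (l : List (List Int))
    (acc : PySem.Set (List Int)) (y : List Int) :
    y ∈ l.foldl (fun next poly =>
        (pvBoundary d poly).foldl (fun next nb => PySem.Set.add next (pvInsSorted nb poly)) next)
        acc ↔
      y ∈ acc ∨ ∃ poly ∈ l, ∃ nb ∈ pvBoundary d poly, y = pvInsSorted nb poly := by
  induction l generalizing acc with
  | nil => simp
  | cons p ps ih =>
    simp only [List.foldl_cons, ih]
    rw [PySem.Set.mem_foldl_add]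
    constructor
    · rintro ((hy | ⟨nb, hnb, hy⟩) | ⟨poly, hpoly, nb, hnb, hy⟩)
      · exact Or.inl hy
      · exact Or.inr ⟨p, by simp, nb, hnb, hy⟩
      · exact Or.inr ⟨poly, by simp [hpoly], nb, hnb, hy⟩
    · rintro (hy | ⟨poly, hpoly, nb, hnb, hy⟩)
      · exact Or.inl (Or.inl hy)
      · rcases List.mem_cons.1 hpoly with h' | h'
        · subst h'; exact Or.inl (Or.inr ⟨nb, hnb, hy⟩)
        · exact Or.inr ⟨poly, h', nb, hnb, hy⟩

lemma pvMem_stepA (d : PySem.Dict Int (List Int)) (cur : PySem.Set (List Int)) (y : List Int) :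
    y ∈ pvStepA d cur ↔ ∃ poly ∈ cur, ∃ nb ∈ pvBoundary d poly, y = pvInsSorted nb poly := by
  unfold pvStepA
  rw [pvStepA_outer_mem]
  simp [PySem.Set.empty]

lemma pvStepA_nodup (d : PySem.Dict Int (List Int)) (cur : PySem.Set (List Int)) :
    (pvStepA d cur).Nodup := by
  unfold pvStepA
  have : ∀ (l : List (List Int)) (acc : PySem.Set (List Int)), acc.Nodup →
      (l.foldl (fun next poly =>
        (pvBoundary d poly).foldl (fun next nb => PySem.Set.add next (pvInsSorted nb poly)) next)
        acc).Nodup := by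
    intro l
    induction l with
    | nil => intro acc h; exact h
    | cons p ps ih =>
      intro acc h
      refine ih _ ?_
      show (List.foldl (fun next nb => next.add (pvInsSorted nb p)) acc (pvBoundary d p)).Nodup
      rw [← PySem.Set.update_map_eq_foldl_add]
      exact PySem.Set.nodup_update _ _ h
  exact this cur PySem.Set.empty (by simp [PySem.Set.empty])


-- ==== A-side: each BFS level is exactly the set of connected subgraphs of its size ====

def pvRep (cur : List (List Int)) : Finset (Finset Int) := (cur.map List.toFinset).toFinset

lemma pvMem_rep (cur : List (List Int)) (S : Finset Int) :
    S ∈ pvRep cur ↔ ∃ p ∈ cur, p.toFinset = S := by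
  simp [pvRep]

lemma pvRep_card (cur : List (List Int)) (hnd : cur.Nodup)
    (hsort : ∀ p ∈ cur, p.Pairwise (· < ·)) : (pvRep cur).card = cur.length := by
  have hmap : (cur.map List.toFinset).Nodup :=
    (List.nodup_map_iff_inj_on hnd).mpr
      (fun a ha b hb hf => pvSorted_inj (hsort a ha) (hsort b hb) hf)
  rw [pvRep, List.toFinset_card_of_nodup hmap, List.length_map]

lemma pvLevel_step (d : PySem.Dict Int (List Int)) (n : Nat)
    (hrange : ∀ u v, v ∈ pvNbr d u → v ∈ pvV n)
    (cur : PySem.Set (List Int)) (t : Int) (ht : 2 ≤ t)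
    (hsort : ∀ p ∈ cur, p.Pairwise (· < ·))
    (hrep : pvRep cur = pvPSpec (pvNbr d) n (t - 1)) :
    (∀ p ∈ pvStepA d cur, p.Pairwise (· < ·)) ∧
    pvRep (pvStepA d cur) = pvPSpec (pvNbr d) n t := by
  have hsort' : ∀ p ∈ pvStepA d cur, p.Pairwise (· < ·) := by
    intro p hp
    obtain ⟨poly, hpoly, nb, hnb, rfl⟩ := (pvMem_stepA d cur p).1 hp
    have hb := (pvMem_boundary d poly nb).1 hnb
    exact pvInsSorted_sorted (hsort poly hpoly) hb.2
  refine ⟨hsort', ?_⟩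
  ext S
  rw [pvMem_rep]
  constructor
  · rintro ⟨p, hp, rfl⟩
    obtain ⟨poly, hpoly, nb, hnb, rfl⟩ := (pvMem_stepA d cur p).1 hp
    obtain ⟨⟨u, hu, hnbr⟩, hnotin⟩ := (pvMem_boundary d poly nb).1 hnb
    have hpolyS : poly.toFinset ∈ pvPSpec (pvNbr d) n (t - 1) := by
      rw [← hrep, pvMem_rep]; exact ⟨poly, hpoly, rfl⟩
    simp only [pvPSpec, Finset.mem_filter, Finset.mem_powerset] at hpolyS ⊢
    obtain ⟨hsub, hgrown, hcard⟩ := hpolyS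
    have hnotinF : nb ∉ poly.toFinset := by simpa using hnotin
    refine ⟨?_, ?_, ?_⟩
    · rw [pvInsSorted_toFinset]
      intro x hx
      rcases Finset.mem_insert.1 hx with h | h
      · subst h; exact hrange u _ hnbr
      · exact hsub h
    · rw [pvInsSorted_toFinset]
      exact PvGrown.step hnotinF (by simpa using hu) hnbr hgrown
    · rw [pvInsSorted_toFinset, Finset.card_insert_of_notMem hnotinF]
      push_cast
      omega
  · intro hS
    simp only [pvPSpec, Finset.mem_filter, Finset.mem_powerset] at hS
    obtain ⟨hsub, hgrown, hcard⟩ := hS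
    cases hgrown with
    | single x => simp at hcard; omega
    | @step S0 w u hw hu ha hS0 =>
      have hS0card : ((S0.card : Int)) = t - 1 := by
        rw [Finset.card_insert_of_notMem hw] at hcard
        push_cast at hcard
        omega
      have hS0mem : S0 ∈ pvPSpec (pvNbr d) n (t - 1) := by
        simp only [pvPSpec, Finset.mem_filter, Finset.mem_powerset]
        exact ⟨fun x hx => hsub (Finset.mem_insert_of_mem hx), hS0, hS0card⟩
      rw [← hrep, pvMem_rep] at hS0mem
      obtain ⟨poly, hpoly, hpf⟩ := hS0mem
      have hnb : w ∈ pvBoundary d poly := by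
        rw [pvMem_boundary]
        constructor
        · exact ⟨u, by rw [← List.mem_toFinset, hpf]; exact hu, ha⟩
        · rw [← List.mem_toFinset, hpf]; exact hw
      refine ⟨pvInsSorted w poly, ?_, ?_⟩
      · rw [pvMem_stepA]; exact ⟨poly, hpoly, w, hnb, rfl⟩
      · rw [pvInsSorted_toFinset, hpf]

lemma pvInit_rep (d : PySem.Dict Int (List Int)) (n : Nat) :
    pvRep ((List.range n).map (fun b => [(b : Int)])) = pvPSpec (pvNbr d) n 1 := by
  ext S
  rw [pvMem_rep]
  simp only [pvPSpec, Finset.mem_filter, Finset.mem_powerset]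
  constructor
  · rintro ⟨p, hp, rfl⟩
    have hp' : ∃ b : Nat, b < n ∧ [((b : Nat) : Int)] = p := by
      simpa using hp
    obtain ⟨b, hb, rfl⟩ := hp'
    refine ⟨?_, ?_, by simp⟩
    · intro x hx
      simp only [List.toFinset_cons, List.toFinset_nil, insert_empty_eq,
        Finset.mem_singleton] at hx
      subst hx
      exact Finset.mem_image.2 ⟨b, Finset.mem_range.2 hb, rfl⟩
    · simpa using PvGrown.single (nbr := pvNbr d) (b : Int)
  · rintro ⟨hsub, _, hcard⟩
    have : S.card = 1 := by omega
    obtain ⟨x, rfl⟩ := Finset.card_eq_one.mp this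
    have hx : x ∈ pvV n := hsub (Finset.mem_singleton_self x)
    obtain ⟨b, hb, rfl⟩ := Finset.mem_image.1 hx
    refine ⟨[(b : Int)], ?_, by simp⟩
    simp only [List.mem_map]
    refine ⟨(b : Int), ?_, rfl⟩
    have hb' := Finset.mem_range.1 hb
    simp [hb']

lemma pvAfold (d : PySem.Dict Int (List Int)) (n : Nat)
    (hrange : ∀ u v, v ∈ pvNbr d u → v ∈ pvV n) (ms : Int) :
    ∀ (k : Nat) (t : Int) (cur : PySem.Set (List Int)) (acc : List (Int × Int)),
    k = (ms + 1 - t).toNat → 2 ≤ t →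
    cur.Nodup → (∀ p ∈ cur, p.Pairwise (· < ·)) →
    pvRep cur = pvPSpec (pvNbr d) n (t - 1) →
    ((PySem.List.pyRange t (ms + 1) 1).foldl
      (fun (acc : List (Int × Int) × PySem.Set (List Int)) s =>
        let next := pvStepA d acc.2
        (acc.1 ++ [(s, (next.length : Int))], next)) (acc, cur)).1
    = acc ++ (PySem.List.pyRange t (ms + 1) 1).map
        (fun σ => (σ, ((pvPSpec (pvNbr d) n σ).card : Int))) := by
  intro k
  induction k with
  | zero =>
    intro t cur acc hk ht hnd hsort hrep
    have hle : ms + 1 ≤ t := by omega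
    rw [PySem.List.pyRange_one_eq_nil hle]
    simp
  | succ k ih =>
    intro t cur acc hk ht hnd hsort hrep
    by_cases hlt : t < ms + 1
    · rw [PySem.List.pyRange_one_cons hlt]
      simp only [List.foldl_cons, List.map_cons]
      obtain ⟨hsort', hrep'⟩ := pvLevel_step d n hrange cur t ht hsort hrep
      have hlen : ((pvStepA d cur).length : Int) = ((pvPSpec (pvNbr d) n t).card : Int) := by
        rw [← pvRep_card (pvStepA d cur) (pvStepA_nodup d cur) hsort', hrep']
      have := ih (t + 1) (pvStepA d cur) (acc ++ [(t, ((pvStepA d cur).length : Int))])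
        (by omega) (by omega) (pvStepA_nodup d cur) hsort' (by simpa using hrep')
      rw [this, hlen]
      simp
    · rw [PySem.List.pyRange_one_eq_nil (by omega)]
      simp


-- ==== B-side: each DFS stack entry counts its pvESpec family exactly once ====

lemma pvSetAdd_toFinset (s : List Int) (x : Int) :
    (PySem.Set.add s x).toFinset = insert x s.toFinset := by
  rw [PySem.Set.add_eq_ite]
  split_ifs with h
  · rw [Finset.insert_eq_self.2 (by simpa using h)]
  · ext a; simp [List.toFinset_append]

lemma pvExt_inner_mem (d : PySem.Dict Int (List Int)) (b : Int) (sub forb : List Int)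
    (m : List Int) (x : Int) : ∀ (acc : List Int),
    x ∈ m.foldl (fun ext v =>
        if b < v ∧ v ∉ sub ∧ v ∉ forb ∧ v ∉ ext then ext ++ [v] else ext) acc ↔
      x ∈ acc ∨ (x ∈ m ∧ b < x ∧ x ∉ sub ∧ x ∉ forb) := by
  induction m with
  | nil => simp
  | cons v vs ih =>
    intro acc
    rw [List.foldl_cons, ih]
    split_ifs with h
    · constructor
      · rintro (hx | hx)
        · rcases List.mem_append.1 hx with hx | hx
          · exact Or.inl hx
          · simp only [List.mem_singleton] at hx; subst hx
            exact Or.inr ⟨by simp, h.1, h.2.1, h.2.2.1⟩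
        · exact Or.inr ⟨List.mem_cons_of_mem _ hx.1, hx.2⟩
      · rintro (hx | ⟨hx1, hx2⟩)
        · exact Or.inl (List.mem_append.2 (Or.inl hx))
        · rcases List.mem_cons.1 hx1 with h' | h'
          · subst h'; exact Or.inl (List.mem_append.2 (Or.inr (by simp)))
          · exact Or.inr ⟨h', hx2⟩
    · constructor
      · rintro (hx | hx)
        · exact Or.inl hx
        · exact Or.inr ⟨List.mem_cons_of_mem _ hx.1, hx.2⟩
      · rintro (hx | ⟨hx1, hx2⟩)
        · exact Or.inl hx
        · rcases List.mem_cons.1 hx1 with h' | h'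
          · subst h'
            have hxacc : x ∈ acc := by
              by_contra hc
              exact h ⟨hx2.1, hx2.2.1, hx2.2.2, hc⟩
            exact Or.inl hxacc
          · exact Or.inr ⟨h', hx2⟩

lemma pvMem_ext (d : PySem.Dict Int (List Int)) (b : Int) (sub forb : List Int) (x : Int) :
    x ∈ pvExt d b sub forb ↔
      (∃ u ∈ sub, x ∈ pvNbr d u) ∧ b < x ∧ x ∉ sub ∧ x ∉ forb := by
  unfold pvExt
  have haux : ∀ (l : List Int), ∀ (acc : List Int),
      x ∈ l.foldl (fun ext u =>
        (pvNbr d u).foldl (fun ext v =>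
          if b < v ∧ v ∉ sub ∧ v ∉ forb ∧ v ∉ ext then ext ++ [v] else ext) ext) acc ↔
      x ∈ acc ∨ ((∃ u ∈ l, x ∈ pvNbr d u) ∧ b < x ∧ x ∉ sub ∧ x ∉ forb) := by
    intro l
    induction l with
    | nil => simp
    | cons u us ih =>
      intro acc
      rw [List.foldl_cons, ih, pvExt_inner_mem d b sub forb (pvNbr d u) x acc]
      constructor
      · rintro ((hx | hx) | ⟨⟨u', hu', hx1⟩, hx2⟩)
        · exact Or.inl hx
        · exact Or.inr ⟨⟨u, by simp, hx.1⟩, hx.2⟩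
        · exact Or.inr ⟨⟨u', by simp [hu'], hx1⟩, hx2⟩
      · rintro (hx | ⟨⟨u', hu', hx1⟩, hx2⟩)
        · exact Or.inl (Or.inl hx)
        · rcases List.mem_cons.1 hu' with h' | h'
          · subst h'; exact Or.inl (Or.inr ⟨hx1, hx2⟩)
          · exact Or.inr ⟨⟨u', h', hx1⟩, hx2⟩
  rw [haux]
  simp

lemma pvChildren_mem (sub : List Int) :
    ∀ (ws blocked : List Int), ∀ e ∈ pvChildren sub blocked ws, ∃ w ∈ ws, e.1 = PySem.Set.add sub w := by
  intro ws
  induction ws with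
  | nil => intro blocked e he; simp [pvChildren] at he
  | cons w ws ih =>
    intro blocked e he
    simp only [pvChildren, List.mem_cons] at he
    rcases he with he | he
    · subst he; exact ⟨w, by simp, rfl⟩
    · obtain ⟨w', hw', h⟩ := ih _ e he
      exact ⟨w', by simp [hw'], h⟩

lemma pvNSpec_empty {nbr : Int → List Int} (hsym : ∀ u v, v ∈ nbr u → u ∈ nbr v)
    {n : Nat} {ms b : Int} {sub blocked : Finset Int} (hne : sub.Nonempty)
    (hcompl : ∀ v, (∃ u ∈ sub, v ∈ nbr u) → b < v → v ∉ sub → v ∉ blocked → False)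
    (t : Int) : pvNSpec nbr n ms b sub blocked t = ∅ := by
  ext S
  simp only [pvNSpec, Finset.mem_filter, Finset.mem_powerset, Finset.notMem_empty, iff_false]
  rintro ⟨hSV, hsub, hneq, hG, hcard, hms', hforb⟩
  obtain ⟨w, hwS, hwns, u, hu, ha⟩ := pvConnector hsym hG hsub hne (fun h => hneq h.symm)
  obtain ⟨hbw, hwb⟩ := hforb w hwS hwns
  exact hcompl w ⟨u, hu, ha⟩ hbw hwns hwb

lemma pvNSpec_split {nbr : Int → List Int} {n : Nat} {ms b : Int}
    {sub blocked : Finset Int} {w : Int} (hwb : b < w) (hwsub : w ∉ sub)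
    (hwblocked : w ∉ blocked) (t : Int) :
    (pvNSpec nbr n ms b sub blocked t).card
      = (pvESpec nbr n ms b (insert w sub) (insert w blocked) t).card
        + (pvNSpec nbr n ms b sub (insert w blocked) t).card := by
  classical
  have hunion : pvNSpec nbr n ms b sub blocked t
      = pvESpec nbr n ms b (insert w sub) (insert w blocked) t
        ∪ pvNSpec nbr n ms b sub (insert w blocked) t := by
    ext S
    simp only [pvNSpec, pvESpec, Finset.mem_union, Finset.mem_filter, Finset.mem_powerset]
    constructor
    · rintro ⟨hSV, hsub, hneq, hG, hcard, hms', hforb⟩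
      by_cases hwS : w ∈ S
      · left
        refine ⟨hSV, ?_, hG, hcard, hms', ?_⟩
        · intro x hx
          rcases Finset.mem_insert.1 hx with h | h
          · subst h; exact hwS
          · exact hsub h
        · intro v hv hvni
          have hvnw : v ≠ w := fun hc => hvni (by rw [hc]; exact Finset.mem_insert_self _ _)
          have hvsub : v ∉ sub := fun hc => hvni (Finset.mem_insert_of_mem hc)
          obtain ⟨h1, h2⟩ := hforb v hv hvsub
          exact ⟨h1, fun hc => (Finset.mem_insert.1 hc).elim hvnw h2⟩
      · right
        refine ⟨hSV, hsub, hneq, hG, hcard, hms', ?_⟩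
        intro v hv hvsub
        obtain ⟨h1, h2⟩ := hforb v hv hvsub
        refine ⟨h1, fun hc => ?_⟩
        rcases Finset.mem_insert.1 hc with h | h
        · subst h; exact hwS hv
        · exact h2 h
    · rintro (⟨hSV, hsub, hG, hcard, hms', hforb⟩ | ⟨hSV, hsub, hneq, hG, hcard, hms', hforb⟩)
      · have hwS : w ∈ S := hsub (Finset.mem_insert_self _ _)
        refine ⟨hSV, fun x hx => hsub (Finset.mem_insert_of_mem hx), ?_, hG, hcard, hms', ?_⟩
        · intro hc; rw [hc] at hwS; exact hwsub hwS
        · intro v hv hvsub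
          by_cases hvw : v = w
          · subst hvw; exact ⟨hwb, hwblocked⟩
          · have : v ∉ insert w sub := fun hc => (Finset.mem_insert.1 hc).elim hvw hvsub
            obtain ⟨h1, h2⟩ := hforb v hv this
            exact ⟨h1, fun hc => h2 (Finset.mem_insert_of_mem hc)⟩
      · refine ⟨hSV, hsub, hneq, hG, hcard, hms', ?_⟩
        intro v hv hvsub
        obtain ⟨h1, h2⟩ := hforb v hv hvsub
        exact ⟨h1, fun hc => h2 (Finset.mem_insert_of_mem hc)⟩
  have hdisj : Disjoint (pvESpec nbr n ms b (insert w sub) (insert w blocked) t)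
      (pvNSpec nbr n ms b sub (insert w blocked) t) := by
    rw [Finset.disjoint_left]
    intro S hS1 hS2
    simp only [pvESpec, pvNSpec, Finset.mem_filter, Finset.mem_powerset] at hS1 hS2
    have hwS : w ∈ S := hS1.2.1 (Finset.mem_insert_self _ _)
    obtain ⟨h1, h2⟩ := hS2.2.2.2.2.2.2 w hwS hwsub
    exact h2 (Finset.mem_insert_self _ _)
  rw [hunion, Finset.card_union_of_disjoint hdisj]

lemma pvESpec_split {nbr : Int → List Int} {n : Nat} {ms b : Int}
    {sub forb : Finset Int} (hV : sub ⊆ pvV n) (hG : PvGrown nbr sub)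
    (hms : (sub.card : Int) ≤ ms) (t : Int) :
    ((pvESpec nbr n ms b sub forb t).card : Int)
      = (if ((sub.card : Int)) = t then 1 else 0) + ((pvNSpec nbr n ms b sub forb t).card : Int) := by
  classical
  have hunion : pvESpec nbr n ms b sub forb t
      = (if ((sub.card : Int)) = t then ({sub} : Finset (Finset Int)) else ∅)
        ∪ pvNSpec nbr n ms b sub forb t := by
    ext S
    simp only [pvESpec, pvNSpec, Finset.mem_union, Finset.mem_filter, Finset.mem_powerset]
    constructor
    · rintro ⟨hSV, hsub, hG', hcard, hms', hforb'⟩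
      by_cases hSeq : S = sub
      · subst hSeq
        left
        rw [if_pos (by omega)]
        exact Finset.mem_singleton_self S
      · right
        exact ⟨hSV, hsub, hSeq, hG', hcard, hms', hforb'⟩
    · rintro (hS | ⟨hSV, hsub, hneq, hG', hcard, hms', hforb'⟩)
      · split_ifs at hS with hc
        · rw [Finset.mem_singleton] at hS
          subst hS
          exact ⟨hV, Finset.Subset.refl _, hG, hc, hms, fun v hv hvn => absurd hv hvn⟩
        · exact absurd hS (Finset.notMem_empty S)
      · exact ⟨hSV, hsub, hG', hcard, hms', hforb'⟩
  have hdisj : Disjoint (if ((sub.card : Int)) = t then ({sub} : Finset (Finset Int)) else ∅)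
      (pvNSpec nbr n ms b sub forb t) := by
    split_ifs with hc
    · rw [Finset.disjoint_left]
      intro S hS1 hS2
      rw [Finset.mem_singleton] at hS1
      subst hS1
      simp only [pvNSpec, Finset.mem_filter] at hS2
      exact hS2.2.2.1 rfl
    · exact Finset.disjoint_empty_left _
  rw [hunion, Finset.card_union_of_disjoint hdisj]
  split_ifs with hc <;> push_cast <;> simp

lemma pvNSpec_full {nbr : Int → List Int} {n : Nat} {ms b : Int}
    {sub forb : Finset Int} (hfull : ms ≤ (sub.card : Int)) (t : Int) :
    pvNSpec nbr n ms b sub forb t = ∅ := by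
  ext S
  simp only [pvNSpec, Finset.mem_filter, Finset.mem_powerset, Finset.notMem_empty, iff_false]
  rintro ⟨hSV, hsub, hneq, hG, hcard, hms', hforb⟩
  have hcardle : S.card ≤ sub.card := by omega
  exact hneq (Finset.eq_of_subset_of_card_le hsub hcardle).symm

lemma pvChildren_sum (d : PySem.Dict Int (List Int)) (n : Nat)
    (hsym : ∀ u v, v ∈ pvNbr d u → u ∈ pvNbr d v) (ms b : Int) (sub : List Int)
    (hne : sub ≠ []) :
    ∀ (ws blocked : List Int), ws.Nodup →
    (∀ w ∈ ws, b < w ∧ w ∉ sub ∧ w ∉ blocked) →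
    (∀ v, (∃ u ∈ sub, v ∈ pvNbr d u) → b < v → v ∉ sub → v ∉ blocked → v ∈ ws) →
    ∀ t, ((pvChildren sub blocked ws).map
        (fun e => ((pvESpec (pvNbr d) n ms b e.1.toFinset e.2.toFinset t).card : Int))).sum
      = ((pvNSpec (pvNbr d) n ms b sub.toFinset blocked.toFinset t).card : Int) := by
  intro ws
  induction ws with
  | nil =>
    intro blocked _ _ hcompl t
    have hnef : sub.toFinset.Nonempty := by
      obtain ⟨x, hx⟩ := List.exists_mem_of_ne_nil sub hne
      exact ⟨x, by simpa using hx⟩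
    rw [pvNSpec_empty hsym hnef ?_ t]
    · simp [pvChildren]
    · intro v hv hbv hvsub hvblocked
      refine absurd (hcompl v ?_ hbv (by simpa using hvsub) (by simpa using hvblocked)) (by simp)
      obtain ⟨u, hu, ha⟩ := hv
      exact ⟨u, by simpa using hu, ha⟩
  | cons w ws ih =>
    intro blocked hnd hws hcompl t
    have hw := hws w (by simp)
    simp only [pvChildren, List.map_cons, List.sum_cons]
    have hwsub' : w ∉ sub := hw.2.1
    have h1 : (PySem.Set.add sub w).toFinset = insert w sub.toFinset := pvSetAdd_toFinset sub w
    have h2 : (PySem.Set.add blocked w).toFinset = insert w blocked.toFinset := pvSetAdd_toFinset blocked w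
    rw [h1, h2]
    have hih := ih (PySem.Set.add blocked w) ((List.nodup_cons.1 hnd).2) ?_ ?_ t
    · rw [h2] at hih
      rw [hih]
      have hsplit := pvNSpec_split (nbr := pvNbr d) (n := n) (ms := ms)
        (sub := sub.toFinset) (blocked := blocked.toFinset) hw.1 (by simpa using hw.2.1)
        (by simpa using hw.2.2) t
      omega
    · intro w' hw'
      have := hws w' (by simp [hw'])
      refine ⟨this.1, this.2.1, ?_⟩
      rw [PySem.Set.add_eq_ite]
      split_ifs with hc
      · exact this.2.2
      · intro hc'
        rcases List.mem_append.1 hc' with h' | h'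
        · exact this.2.2 h'
        · simp only [List.mem_singleton] at h'
          subst h'
          exact (List.nodup_cons.1 hnd).1 hw'
    · intro v hv hbv hvsub hvblocked
      have hvb : v ∉ blocked := by
        intro hc
        apply hvblocked
        rw [PySem.Set.add_eq_ite]
        split_ifs with hc' <;> simp [hc]
      have hvw : v ≠ w := by
        intro hc
        subst hc
        apply hvblocked
        rw [PySem.Set.add_eq_ite]
        split_ifs with hc' <;> simp [hc']
      have := hcompl v hv hbv hvsub hvb
      rcases List.mem_cons.1 this with h' | h'
      · exact absurd h' hvw
      · exact h'


lemma pvESpec_full_card {nbr : Int → List Int} {n : Nat} {ms b : Int}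
    {sub forb : Finset Int} (hV : sub ⊆ pvV n) (hG : PvGrown nbr sub)
    (hlen : (sub.card : Int) ≤ ms) (hguard : ms ≤ (sub.card : Int)) (t : Int) :
    ((pvESpec nbr n ms b sub forb t).card : Int)
      = if ((sub.card : Int)) = t then 1 else 0 := by
  rw [pvESpec_split hV hG hlen t, pvNSpec_full (nbr := nbr) hguard t]
  simp

lemma pvDrain_spec (d : PySem.Dict Int (List Int)) (n : Nat)
    (hsym : ∀ u v, v ∈ pvNbr d u → u ∈ pvNbr d v)
    (hrange : ∀ u v, v ∈ pvNbr d u → v ∈ pvV n) (ms b : Int) :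
    ∀ (stack : List (List Int × List Int)) (tally : PySem.Dict Int Int),
    (∀ e ∈ stack, e.1.Nodup ∧ e.1 ≠ [] ∧ e.1.toFinset ⊆ pvV n ∧
      PvGrown (pvNbr d) e.1.toFinset ∧ (e.1.length : Int) ≤ ms) →
    ∀ t, (pvDrain d ms b stack tally).getD t 0
      = tally.getD t 0 + (stack.map
          (fun e => ((pvESpec (pvNbr d) n ms b e.1.toFinset e.2.toFinset t).card : Int))).sum := by
  intro stack tally
  induction stack, tally using pvDrain.induct d ms b with
  | case1 tally =>
    intro _ t
    simp [pvDrain]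
  | case2 tally sub forb rest s tally' hguard ih =>
    intro hinv t
    obtain ⟨hnd, hne, hV, hG, hlen⟩ := hinv (sub, forb) (by simp)
    have hcardF : sub.toFinset.card = sub.length := List.toFinset_card_of_nodup hnd
    rw [pvDrain]
    rw [if_pos hguard]
    rw [ih (fun e he => hinv e (by simp [he])) t]
    have hhead : ((pvESpec (pvNbr d) n ms b sub.toFinset forb.toFinset t).card : Int)
        = if ((sub.toFinset.card : Int)) = t then 1 else 0 :=
      pvESpec_full_card hV hG (by rw [hcardF]; exact hlen) (by rw [hcardF]; exact hguard) t
    have htG : tally'.getD t 0 = if t = ((sub.length : Nat) : Int) then tally.getD t 0 + 1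
        else tally.getD t 0 := by
      show (tally.insert _ _).getD t 0 = _
      rw [PySem.Dict.getD_insert]
      split_ifs with hc
      · rw [hc]
      · rfl
    rw [List.map_cons, List.sum_cons, htG, hhead]
    rw [hcardF]
    split_ifs with h1 h2 h2 <;> omega
  | case3 tally sub forb rest s tally' hguard ext ih =>
    intro hinv t
    obtain ⟨hnd, hne, hV, hG, hlen⟩ := hinv (sub, forb) (by simp)
    have hcardF : sub.toFinset.card = sub.length := List.toFinset_card_of_nodup hnd
    rw [pvDrain]
    rw [if_neg hguard]
    have hinv' : ∀ e ∈ pvChildren sub forb ext ++ rest, e.1.Nodup ∧ e.1 ≠ [] ∧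
        e.1.toFinset ⊆ pvV n ∧ PvGrown (pvNbr d) e.1.toFinset ∧ (e.1.length : Int) ≤ ms := by
      intro e he
      rcases List.mem_append.1 he with he | he
      · obtain ⟨w, hw, he1⟩ := pvChildren_mem sub ext forb e he
        have hwp := (pvMem_ext d b sub forb w).1 hw
        obtain ⟨⟨u, hu, ha⟩, hbw, hwsub, hwforb⟩ := hwp
        have hadd : e.1 = sub ++ [w] := by rw [he1, PySem.Set.add_of_not_mem hwsub]
        refine ⟨?_, ?_, ?_, ?_, ?_⟩
        · rw [hadd]
          exact List.Nodup.append hnd (by simp) (by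
            intro x hx hx'
            simp only [List.mem_singleton] at hx'
            subst hx'
            exact hwsub hx)
        · rw [hadd]; simp
        · rw [he1, pvSetAdd_toFinset]
          intro x hx
          rcases Finset.mem_insert.1 hx with h | h
          · subst h; exact hrange u x ha
          · exact hV h
        · rw [he1, pvSetAdd_toFinset]
          exact PvGrown.step (by simpa using hwsub) (by simpa using hu) ha hG
        · rw [hadd]
          simp only [List.length_append, List.length_cons, List.length_nil]
          push_cast
          omega
      · exact hinv e (List.mem_cons_of_mem _ he)
    rw [ih hinv' t, List.map_append, List.sum_append]
    have hsum : ((pvChildren sub forb ext).map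
        (fun e => ((pvESpec (pvNbr d) n ms b e.1.toFinset e.2.toFinset t).card : Int))).sum
        = ((pvNSpec (pvNbr d) n ms b sub.toFinset forb.toFinset t).card : Int) := by
      refine pvChildren_sum d n hsym ms b sub hne ext forb (pvExt_nodup d b sub forb) ?_ ?_ t
      · intro w hw
        obtain ⟨_, hbw, hwsub, hwforb⟩ := (pvMem_ext d b sub forb w).1 hw
        exact ⟨hbw, hwsub, hwforb⟩
      · intro v hv hbv hvsub hvforb
        exact (pvMem_ext d b sub forb v).2 ⟨hv, hbv, hvsub, hvforb⟩
    have hhead : ((pvESpec (pvNbr d) n ms b sub.toFinset forb.toFinset t).card : Int)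
        = (if ((sub.toFinset.card : Int)) = t then 1 else 0)
          + ((pvNSpec (pvNbr d) n ms b sub.toFinset forb.toFinset t).card : Int) :=
      pvESpec_split hV hG (by rw [hcardF]; exact hlen) t
    have htG : tally'.getD t 0 = if t = ((sub.length : Nat) : Int) then tally.getD t 0 + 1
        else tally.getD t 0 := by
      show (tally.insert _ _).getD t 0 = _
      rw [PySem.Dict.getD_insert]
      split_ifs with hc
      · rw [hc]
      · rfl
    rw [List.map_cons, List.sum_cons, htG, hsum, hhead, hcardF]
    split_ifs with h1 h2 h2 <;> omega


lemma pvSeeds_spec (d : PySem.Dict Int (List Int)) (n : Nat)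
    (hsym : ∀ u v, v ∈ pvNbr d u → u ∈ pvNbr d v)
    (hrange : ∀ u v, v ∈ pvNbr d u → v ∈ pvV n) (ms : Int) (hms : 2 ≤ ms) :
    ∀ (l : List Nat) (tally : PySem.Dict Int Int), (∀ b ∈ l, b < n) → ∀ t,
    ((l.foldl (fun (tally : PySem.Dict Int Int) (b : Nat) =>
        pvDrain d ms (b : Int) [([(b : Int)], PySem.Set.empty)] tally) tally).getD t 0)
      = tally.getD t 0 + (l.map (fun b : Nat =>
          ((pvESpec (pvNbr d) n ms (b : Int) ({((b : Nat) : Int)} : Finset Int)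
            (∅ : Finset Int) t).card : Int))).sum := by
  intro l
  induction l with
  | nil => intro tally _ t; simp
  | cons b l ih =>
    intro tally hlt t
    rw [List.foldl_cons, List.map_cons, List.sum_cons,
      ih _ (fun b' hb' => hlt b' (by simp [hb'])) t]
    have hdr := pvDrain_spec d n hsym hrange ms (b : Int)
      [([(b : Int)], PySem.Set.empty)] tally ?_ t
    · rw [hdr]
      have h1 : ([(b : Int)] : List Int).toFinset = ({((b : Nat) : Int)} : Finset Int) := by simp
      have h2 : (PySem.Set.empty : List Int).toFinset = (∅ : Finset Int) := rfl
      rw [List.map_cons]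
      simp only [h1, h2, List.map_nil, List.sum_cons, List.sum_nil]
      ring
    · intro e he
      simp only [List.mem_singleton] at he
      subst he
      refine ⟨by simp, by simp, ?_, ?_, by simp; omega⟩
      · intro x hx
        simp only [List.toFinset_cons, List.toFinset_nil, insert_empty_eq,
          Finset.mem_singleton] at hx
        subst hx
        exact Finset.mem_image.2 ⟨b, Finset.mem_range.2 (hlt b (by simp)), rfl⟩
      · simpa using PvGrown.single (nbr := pvNbr d) ((b : Nat) : Int)

lemma pvMin_partition (nbr : Int → List Int) (n : Nat) (ms : Int) (t : Int)
    (ht : 2 ≤ t) (hts : t ≤ ms) :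
    ((List.range n).map (fun b : Nat =>
        ((pvESpec nbr n ms (b : Int) ({((b : Nat) : Int)} : Finset Int)
          (∅ : Finset Int) t).card : Int))).sum
      = ((pvPSpec nbr n t).card : Int) := by
  classical
  have hbi : pvPSpec nbr n t = (Finset.range n).biUnion
      (fun b => pvESpec nbr n ms (b : Int) ({((b : Nat) : Int)} : Finset Int) (∅ : Finset Int) t) := by
    ext S
    simp only [Finset.mem_biUnion]
    constructor
    · intro hS
      have hS' := hS
      simp only [pvPSpec, Finset.mem_filter, Finset.mem_powerset] at hS'
      obtain ⟨hSV, hG, hcard⟩ := hS'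
      have hpos : 0 < S.card := by omega
      have hne : S.Nonempty := Finset.card_pos.1 hpos
      have hmin := S.min'_mem hne
      obtain ⟨b, hb, hbeq⟩ := Finset.mem_image.1 (hSV hmin)
      refine ⟨b, hb, ?_⟩
      simp only [pvESpec, Finset.mem_filter, Finset.mem_powerset]
      refine ⟨hSV, ?_, hG, hcard, by omega, ?_⟩
      · intro x hx
        rw [Finset.mem_singleton] at hx
        subst hx
        rw [hbeq]
        exact hmin
      · intro v hv hvne
        rw [Finset.mem_singleton] at hvne
        refine ⟨?_, Finset.notMem_empty v⟩
        rw [hbeq]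
        exact lt_of_le_of_ne (S.min'_le v hv) (fun hc => hvne (by rw [← hc, hbeq]))
    · rintro ⟨b, hb, hS⟩
      simp only [pvESpec, Finset.mem_filter, Finset.mem_powerset] at hS
      simp only [pvPSpec, Finset.mem_filter, Finset.mem_powerset]
      exact ⟨hS.1, hS.2.2.1, hS.2.2.2.1⟩
  have hdisj : ∀ x ∈ Finset.range n, ∀ y ∈ Finset.range n, x ≠ y →
      Disjoint (pvESpec nbr n ms (x : Int) ({((x : Nat) : Int)} : Finset Int) (∅ : Finset Int) t)
        (pvESpec nbr n ms (y : Int) ({((y : Nat) : Int)} : Finset Int) (∅ : Finset Int) t) := by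
    intro x _ y _ hxy
    rw [Finset.disjoint_left]
    intro S hSx hSy
    simp only [pvESpec, Finset.mem_filter, Finset.mem_powerset] at hSx hSy
    have hxS : ((x : Nat) : Int) ∈ S := hSx.2.1 (Finset.mem_singleton_self _)
    have hyS : ((y : Nat) : Int) ∈ S := hSy.2.1 (Finset.mem_singleton_self _)
    have hxy' : ((x : Nat) : Int) ≠ ((y : Nat) : Int) := fun hc => hxy (by exact_mod_cast hc)
    have h1 := (hSx.2.2.2.2.2 _ hyS (by simpa using hxy'.symm)).1
    have h2 := (hSy.2.2.2.2.2 _ hxS (by simpa using hxy')).1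
    omega
  have hcard := Finset.card_biUnion hdisj
  rw [hbi, hcard]
  rw [Nat.cast_sum]
  exact rfl

-- ==== assembling the two ports ====

lemma pvPre_facts (adjacency : List (Int × List Int))
    (hedges : ∀ p ∈ adjacency, ∀ v ∈ p.2,
      (∃ j ∈ List.range adjacency.length, v = ((j : Nat) : Int)) ∧
      p.1 ∈ pvNbr (PySem.Dict.mk adjacency) v) :
    (∀ u v, v ∈ pvNbr (PySem.Dict.mk adjacency) u → u ∈ pvNbr (PySem.Dict.mk adjacency) v) ∧
    (∀ u v, v ∈ pvNbr (PySem.Dict.mk adjacency) u → v ∈ pvV adjacency.length) := by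
  have hmem : ∀ u v, v ∈ pvNbr (PySem.Dict.mk adjacency) u →
      ∃ l, (u, l) ∈ adjacency ∧ v ∈ l := by
    intro u v hv
    simp only [pvNbr, PySem.Dict.getD_eq_get?_getD] at hv
    rcases h : (PySem.Dict.mk adjacency).get? u with _ | lu
    · simp [h] at hv
    · simp only [h, Option.getD_some] at hv
      exact ⟨lu, PySem.Dict.mem_items_of_get?_eq_some _ h, hv⟩
  constructor
  · intro u v hv
    obtain ⟨l, hl, hvl⟩ := hmem u v hv
    exact (hedges (u, l) hl v hvl).2
  · intro u v hv
    obtain ⟨l, hl, hvl⟩ := hmem u v hv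
    obtain ⟨j, hj, hveq⟩ := (hedges (u, l) hl v hvl).1
    subst hveq
    exact Finset.mem_image.2 ⟨j, by simpa using hj, rfl⟩

theorem count_polymers_exact_spec : Claim_equal_count_polymers_exact := by
  intro adjacency max_size hdom hpre
  unfold Spec_count_polymers_exact
  by_cases hms : max_size < 2
  · simp only [count_polymers_exact, count_polymers_exact_alt, if_pos hms]
  · rcases hpre with h | ⟨hnd, hkeys, hedges⟩
    · exact absurd h hms
    obtain ⟨hsym, hrange⟩ := pvPre_facts adjacency hedges
    have hms' : 2 ≤ max_size := by omega
    simp only [count_polymers_exact, count_polymers_exact_alt, if_neg hms]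
    set d : PySem.Dict Int (List Int) := PySem.Dict.mk adjacency with hd
    set n : Nat := d.size with hn
    have hnlen : n = adjacency.length := rfl
    rw [hnlen] at *
    -- A side
    have hcastr : (((List.range adjacency.length) : List Nat) : List Int)
        = (List.range adjacency.length).map (fun i : Nat => (i : Int)) :=
      List.map_eq_flatMap.symm
    have hLnodup : ((List.range adjacency.length).map (fun b => [(b : Int)])).Nodup := by
      rw [hcastr, List.map_map]
      refine List.Nodup.map ?_ (List.nodup_range)
      intro a b hab
      simpa using hab
    have hofl : PySem.Set.ofList ((List.range adjacency.length).map (fun b => [(b : Int)]))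
        = (List.range adjacency.length).map (fun b => [(b : Int)]) :=
      PySem.Set.ofList_eq_self_of_nodup _ hLnodup
    have hsort1 : ∀ p ∈ (List.range adjacency.length).map (fun b => [(b : Int)]),
        p.Pairwise (· < ·) := by
      intro p hp
      have : ∃ b : Nat, b < adjacency.length ∧ [((b : Nat) : Int)] = p := by simpa using hp
      obtain ⟨b, _, rfl⟩ := this
      simp
    have hrep1 : pvRep ((List.range adjacency.length).map (fun b => [(b : Int)]))
        = pvPSpec (pvNbr d) adjacency.length ((2 : Int) - 1) := by
      rw [show ((2 : Int) - 1) = 1 by norm_num]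
      exact pvInit_rep d adjacency.length
    have hA := pvAfold d adjacency.length hrange max_size ((max_size + 1 - 2).toNat) 2
      (PySem.Set.ofList ((List.range adjacency.length).map (fun b => [(b : Int)])))
      [(1, (adjacency.length : Int))] rfl (le_refl 2)
      (by rw [hofl]; exact hLnodup) (by rw [hofl]; exact hsort1) (by rw [hofl]; exact hrep1)
    rw [hA]
    -- B side
    have hfold : List.foldl
          (fun tally b => pvDrain d max_size b [([b], PySem.Set.empty)] tally)
          PySem.Dict.empty (((List.range adjacency.length) : List Nat) : List Int)
        = List.foldl (fun (tally : PySem.Dict Int Int) (b : Nat) =>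
            pvDrain d max_size (b : Int) [([(b : Int)], PySem.Set.empty)] tally)
            PySem.Dict.empty (List.range adjacency.length) := by
      rw [hcastr, List.foldl_map]
    rw [hfold]
    have hseeds := pvSeeds_spec d adjacency.length hsym hrange max_size hms'
      (List.range adjacency.length) PySem.Dict.empty
      (fun b hb => List.mem_range.1 hb)
    congr 1
    refine List.map_congr_left ?_
    intro s hs
    obtain ⟨hs2, hslt⟩ := PySem.List.mem_pyRange_one.1 hs
    have hgd := hseeds s
    rw [PySem.Dict.getD_empty, pvMin_partition (pvNbr d) adjacency.length max_size s hs2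
      (by omega)] at hgd
    rw [hgd]
    norm_num
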